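-- pv_equiv track=rewrite | github.com/masteronprime/python-codigos-diversos | calendario tarea.py | cuerpoCalendario
-- ===== SOURCE A (Python) =====
-- def cuerpoCalendario(diaSemana, nroDias):
--   # -- Mostrar los días del calendario
--   texto = '│    '*(diaSemana-1)+'│'
--   for dia in range(1, nroDias+1):
--     # -- Mostrar día del mes
--     texto += ('  ' if dia < 10 else ' ') + str(dia) + ' │'
--     # -- incrementar día semana
--     diaSemana += 1
--     # -- verificar si se llegó a fin de semana
--     if diaSemana > 7:
--       # -- Cambio de línea
--       texto += '\n│'
--       # -- Incializar día semana
--       diaSemana = 1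
--   # -- Completar espacios si hiciese falta
--   texto += '    │'*(8-diaSemana)+'\n'
--   return texto
-- ===== SOURCE B (Python) =====
-- def cuerpoCalendario(diaSemana, nroDias):
--   # Collect the month as a list of rows (each a list of fixed-width cells),
--   # then render every row uniformly as '|' + cells + newline.
--   filas = [['    \u2502'] * (diaSemana - 1)]
--   sem = diaSemana
--   for dia in range(1, nroDias + 1):
--     filas[-1].append(('  ' if dia < 10 else ' ') + str(dia) + ' \u2502')
--     sem += 1
--     if sem > 7:
--       filas.append([])
--       sem = 1
--   filas[-1] += ['    \u2502'] * (8 - sem)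
--   return ''.join('\u2502' + ''.join(f) + '\n' for f in filas)
-- ===== Notes on version B (the rewrite author's own statement) =====
-- stated objective: alternative
-- what changed: A accumulates one running string, splicing a newline-plus-border edit into it whenever the weekday counter overflows; B collects the month as a list of rows (each a list of fixed-width cells), prefilling the first row and padding the last, and renders every row uniformly as border + cells + newline in a final pass.
import Mathlib
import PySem

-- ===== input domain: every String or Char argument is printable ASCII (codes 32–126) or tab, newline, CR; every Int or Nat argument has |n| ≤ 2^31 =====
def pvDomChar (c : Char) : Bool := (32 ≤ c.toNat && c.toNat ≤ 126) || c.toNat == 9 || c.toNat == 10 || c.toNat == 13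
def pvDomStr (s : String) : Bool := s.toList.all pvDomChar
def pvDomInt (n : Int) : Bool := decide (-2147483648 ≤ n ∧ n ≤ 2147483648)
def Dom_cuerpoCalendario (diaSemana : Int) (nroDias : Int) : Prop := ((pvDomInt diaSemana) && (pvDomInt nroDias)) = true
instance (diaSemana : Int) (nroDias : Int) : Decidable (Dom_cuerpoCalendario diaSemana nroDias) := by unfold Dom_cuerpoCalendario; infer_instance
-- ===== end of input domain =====

-- B collects the month as a list of rows (lists of cells) rendered uniformly at the end,
-- instead of A's single running string with embedded newline-plus-border edits
-- (objective: alternative decomposition, same cost).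

-- ===== PORT A =====
-- exact: Python 'str * int' (n ≤ 0 gives '')
def pyStrMulCal (s : String) (n : Int) : String := String.join (List.replicate n.toNat s)

def cuerpoCalendario (diaSemana : Int) (nroDias : Int) : String :=
  let texto := pyStrMulCal "│    " (diaSemana - 1) ++ "│"
  let st := (PySem.List.pyRange 1 (nroDias + 1) 1).foldl
    (fun (s : String × Int) dia =>
      let t := s.1 ++ ((if dia < 10 then "  " else " ") ++ PySem.Int.toStr dia ++ " │")
      let w := s.2 + 1
      if w > 7 then (t ++ "\n│", 1) else (t, w)) (texto, diaSemana)
  st.1 ++ pyStrMulCal "    │" (8 - st.2) ++ "\n"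

-- ===== PORT B =====
-- Source B's 'filas[-1].append(x)' / 'filas[-1] += xs'; exact for nonempty filas (Source B's filas never is empty)
def pyLastExtendCal (filas : List (List String)) (xs : List String) : List (List String) :=
  filas.dropLast ++ [filas.getLastD [] ++ xs]

def cuerpoCalendario_alt (diaSemana : Int) (nroDias : Int) : String :=
  let filas0 : List (List String) := [List.replicate (diaSemana - 1).toNat "    │"]
  let st := (PySem.List.pyRange 1 (nroDias + 1) 1).foldl
    (fun (s : List (List String) × Int) dia =>
      let filas := pyLastExtendCal s.1 [(if dia < 10 then "  " else " ") ++ PySem.Int.toStr dia ++ " │"]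
      let sem := s.2 + 1
      if sem > 7 then (filas ++ [[]], 1) else (filas, sem)) (filas0, diaSemana)
  let filas := pyLastExtendCal st.1 (List.replicate (8 - st.2).toNat "    │")
  String.join (filas.map (fun f => "│" ++ String.join f ++ "\n"))

-- ===== PRECONDITION & SPEC =====
def Spec_cuerpoCalendario (diaSemana : Int) (nroDias : Int) (out : String) : Prop := out = cuerpoCalendario_alt diaSemana nroDias
instance (diaSemana : Int) (nroDias : Int) (out : String) : Decidable (Spec_cuerpoCalendario diaSemana nroDias out) := by unfold Spec_cuerpoCalendario; infer_instance

-- ===== CLAIM (what is proved, stated in full; the proofs are below) =====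
def Claim_equal_cuerpoCalendario : Prop := ∀ (diaSemana : Int) (nroDias : Int), Dom_cuerpoCalendario diaSemana nroDias → Spec_cuerpoCalendario diaSemana nroDias (cuerpoCalendario diaSemana nroDias)

-- ===== LEMMAS AND PROOFS =====

theorem strFoldlAppend (l : List String) : ∀ a : String,
    l.foldl (· ++ ·) a = a ++ l.foldl (· ++ ·) "" := by
  induction l with
  | nil => intro a; simp [List.foldl, String.append_empty]
  | cons s l ih =>
    intro a
    simp only [List.foldl]
    rw [ih (a ++ s), ih ("" ++ s), String.empty_append, String.append_assoc]

theorem strJoinCons (s : String) (l : List String) :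
    String.join (s :: l) = s ++ String.join l := by
  simp only [String.join, List.foldl]
  rw [strFoldlAppend, String.empty_append]

theorem strJoinAppend (l1 l2 : List String) :
    String.join (l1 ++ l2) = String.join l1 ++ String.join l2 := by
  induction l1 with
  | nil => simp [String.join, String.empty_append]
  | cons s l ih =>
    simp only [List.cons_append, strJoinCons, ih, String.append_assoc]

-- "\n" followed by the next row's "│", reassociated
theorem nlbar0 : ("\n" : String) ++ "│" = "\n│" := by decide

-- the rendering of B's row list
def renderCal (rows : List (List String)) : String :=
  String.join (rows.map (fun f => "│" ++ String.join f ++ "\n"))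

theorem renderCal_concat (rs : List (List String)) (x : List String) :
    renderCal (rs ++ [x]) = renderCal rs ++ ("│" ++ String.join x ++ "\n") := by
  unfold renderCal
  rw [List.map_append, strJoinAppend, List.map_singleton, strJoinCons]
  simp [String.join, String.append_empty]

theorem lastExtend_concat (rs : List (List String)) (cur xs : List String) :
    pyLastExtendCal (rs ++ [cur]) xs = rs ++ [cur ++ xs] := by
  unfold pyLastExtendCal
  rw [List.dropLast_concat, List.getLastD_concat]

-- A's leading '│    '*k+'│' equals '│' followed by k blank cells
theorem barsSwap : ∀ m : Nat,
    String.join (List.replicate m "│    ") ++ "│" = "│" ++ String.join (List.replicate m "    │") := by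
  intro m
  induction m with
  | zero => decide
  | succ m ih =>
    simp only [List.replicate_succ, strJoinCons]
    rw [String.append_assoc, ih, ← String.append_assoc, ← String.append_assoc,
      show ("│    " : String) ++ "│" = "│" ++ "    │" by decide]

-- A's string state is always the render of B's finished rows, a border, and the open row
theorem fold_rel (l : List Int) : ∀ (rs : List (List String)) (cur : List String) (sem : Int),
    ∃ rs' cur',
      l.foldl (fun (s : List (List String) × Int) dia =>
          let filas := pyLastExtendCal s.1 [(if dia < 10 then "  " else " ") ++ PySem.Int.toStr dia ++ " │"]
          let sem := s.2 + 1
          if sem > 7 then (filas ++ [[]], 1) else (filas, sem)) (rs ++ [cur], sem)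
        = (rs' ++ [cur'],
           (l.foldl (fun (s : String × Int) dia =>
              let t := s.1 ++ ((if dia < 10 then "  " else " ") ++ PySem.Int.toStr dia ++ " │")
              let w := s.2 + 1
              if w > 7 then (t ++ "\n│", 1) else (t, w))
             (renderCal rs ++ "│" ++ String.join cur, sem)).2)
      ∧ (l.foldl (fun (s : String × Int) dia =>
            let t := s.1 ++ ((if dia < 10 then "  " else " ") ++ PySem.Int.toStr dia ++ " │")
            let w := s.2 + 1
            if w > 7 then (t ++ "\n│", 1) else (t, w))
           (renderCal rs ++ "│" ++ String.join cur, sem)).1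
          = renderCal rs' ++ "│" ++ String.join cur' := by
  induction l with
  | nil =>
    intro rs cur sem
    exact ⟨rs, cur, rfl, rfl⟩
  | cons dia r ih =>
    intro rs cur sem
    rw [List.foldl_cons, List.foldl_cons]
    have hext : pyLastExtendCal (rs ++ [cur])
        [(if dia < 10 then "  " else " ") ++ PySem.Int.toStr dia ++ " │"]
        = rs ++ [cur ++ [(if dia < 10 then "  " else " ") ++ PySem.Int.toStr dia ++ " │"]] :=
      lastExtend_concat rs cur _
    by_cases h : sem + 1 > 7
    · -- end of week: A appends "\n│", B closes the row and opens an empty one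
      have hstrA : (renderCal rs ++ "│" ++ String.join cur
            ++ ((if dia < 10 then "  " else " ") ++ PySem.Int.toStr dia ++ " │")) ++ "\n│"
          = renderCal (rs ++ [cur ++ [(if dia < 10 then "  " else " ") ++ PySem.Int.toStr dia ++ " │"]])
            ++ "│" ++ String.join ([] : List String) := by
        rw [renderCal_concat, strJoinAppend, strJoinCons]
        simp only [String.join, List.foldl_nil, String.append_empty, ← nlbar0]
        simp [String.append_assoc]
      obtain ⟨rs', cur', h1, h2⟩ :=
        ih (rs ++ [cur ++ [(if dia < 10 then "  " else " ") ++ PySem.Int.toStr dia ++ " │"]]) [] 1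
      refine ⟨rs', cur', ?_, ?_⟩
      · simp only [hext, if_pos h, hstrA]
        exact h1
      · simp only [hext, if_pos h, hstrA]
        exact h2
    · -- week continues: both sides extend the open row
      have hstrA : renderCal rs ++ "│" ++ String.join cur
            ++ ((if dia < 10 then "  " else " ") ++ PySem.Int.toStr dia ++ " │")
          = renderCal rs ++ "│"
            ++ String.join (cur ++ [(if dia < 10 then "  " else " ") ++ PySem.Int.toStr dia ++ " │"]) := by
        rw [strJoinAppend, strJoinCons]
        simp [String.join, String.append_assoc, String.append_empty]
      obtain ⟨rs', cur', h1, h2⟩ :=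
        ih rs (cur ++ [(if dia < 10 then "  " else " ") ++ PySem.Int.toStr dia ++ " │"]) (sem + 1)
      refine ⟨rs', cur', ?_, ?_⟩
      · simp only [hext, if_neg h, hstrA]
        exact h1
      · simp only [hext, if_neg h, hstrA]
        exact h2

-- ===== VERDICT (by name: the statement is the Claim_ definition above) =====
theorem cuerpoCalendario_spec : Claim_equal_cuerpoCalendario := by
  intro d n _
  unfold Spec_cuerpoCalendario
  have h0A : cuerpoCalendario d n
      = ((PySem.List.pyRange 1 (n + 1) 1).foldl
          (fun (s : String × Int) dia =>
            let t := s.1 ++ ((if dia < 10 then "  " else " ") ++ PySem.Int.toStr dia ++ " │")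
            let w := s.2 + 1
            if w > 7 then (t ++ "\n│", 1) else (t, w))
          (pyStrMulCal "│    " (d - 1) ++ "│", d)).1
        ++ pyStrMulCal "    │"
          (8 - ((PySem.List.pyRange 1 (n + 1) 1).foldl
            (fun (s : String × Int) dia =>
              let t := s.1 ++ ((if dia < 10 then "  " else " ") ++ PySem.Int.toStr dia ++ " │")
              let w := s.2 + 1
              if w > 7 then (t ++ "\n│", 1) else (t, w))
            (pyStrMulCal "│    " (d - 1) ++ "│", d)).2) ++ "\n" := rfl
  have h0B : cuerpoCalendario_alt d n
      = renderCal (pyLastExtendCal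
          ((PySem.List.pyRange 1 (n + 1) 1).foldl
            (fun (s : List (List String) × Int) dia =>
              let filas := pyLastExtendCal s.1 [(if dia < 10 then "  " else " ") ++ PySem.Int.toStr dia ++ " │"]
              let sem := s.2 + 1
              if sem > 7 then (filas ++ [[]], 1) else (filas, sem))
            ([List.replicate (d - 1).toNat "    │"], d)).1
          (List.replicate
            (8 - ((PySem.List.pyRange 1 (n + 1) 1).foldl
              (fun (s : List (List String) × Int) dia =>
                let filas := pyLastExtendCal s.1 [(if dia < 10 then "  " else " ") ++ PySem.Int.toStr dia ++ " │"]
                let sem := s.2 + 1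
                if sem > 7 then (filas ++ [[]], 1) else (filas, sem))
              ([List.replicate (d - 1).toNat "    │"], d)).2).toNat "    │")) := rfl
  -- align the two initial states with the fold relation
  have hinit : pyStrMulCal "│    " (d - 1) ++ "│"
      = renderCal [] ++ "│" ++ String.join (List.replicate (d - 1).toNat "    │") := by
    unfold pyStrMulCal renderCal
    rw [barsSwap]
    simp [String.join, String.empty_append, String.append_assoc]
  obtain ⟨rs', cur', h1, h2⟩ := fold_rel (PySem.List.pyRange 1 (n + 1) 1)
    [] (List.replicate (d - 1).toNat "    │") d
  simp only [List.nil_append] at h1 h2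
  rw [h0A, h0B, hinit, h1, h2]
  rw [lastExtend_concat, renderCal_concat, strJoinAppend]
  unfold pyStrMulCal
  simp [String.append_assoc]
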